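-- pv_equiv track=rewrite | github.com/NiJingzhe/SimpleCADAPI | src/simplecadapi/auto_tools/make_export.py | generate_aliases
-- ===== SOURCE A (Python) =====
-- from typing import Dict, List, Mapping, Sequence, Tuple
--
-- ALIAS_RULES = {
--     "make_point_rvertex": "create_point",
--     "make_line_redge": "create_line",
--     "make_segment_redge": "create_segment",
--     "make_segment_rwire": "create_segment_wire",
--     "make_circle_redge": "create_circle_edge",
--     "make_circle_rwire": "create_circle_wire",
--     "make_circle_rface": "create_circle_face",
--     "make_rectangle_rwire": "create_rectangle_wire",
--     "make_rectangle_rface": "create_rectangle_face",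
--     "make_box_rsolid": "create_box",
--     "make_cylinder_rsolid": "create_cylinder",
--     "make_sphere_rsolid": "create_sphere",
--     "make_angle_arc_redge": "create_angle_arc",
--     "make_angle_arc_rwire": "create_angle_arc_wire",
--     "make_three_point_arc_redge": "create_arc",
--     "make_three_point_arc_rwire": "create_arc_wire",
--     "make_spline_redge": "create_spline",
--     "make_spline_rwire": "create_spline_wire",
--     "make_polyline_rwire": "create_polyline_wire",
--     "make_helix_redge": "create_helix",
--     "make_helix_rwire": "create_helix_wire",
--     "make_face_from_wire_rface": "create_face_from_wire",
--     "make_wire_from_edges_rwire": "create_wire_from_edges",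
--     "make_field_surface_rsolid": "create_field_surface",
--     "translate_shape": "translate",
--     "rotate_shape": "rotate",
--     "extrude_rsolid": "extrude",
--     "revolve_rsolid": "revolve",
--     "union_rsolidlist": "union",
--     "cut_rsolidlist": "cut",
--     "intersect_rsolidlist": "intersect",
--     "export_step": "to_step",
--     "export_stl": "to_stl",
-- }
--
-- def generate_aliases(functions: Sequence[str]) -> str:
--     alias_lines = ["# 便于使用的别名", "Workplane = SimpleWorkplane", ""]
--
--     alias_categories: Dict[str, List[Tuple[str, str]]] = {}
--     for func in functions:
--         alias = ALIAS_RULES.get(func)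
--         if alias is None:
--             continue
--
--         if func.startswith("make_"):
--             category = "创建函数别名"
--         elif func.startswith(("translate_", "rotate_")):
--             category = "变换操作别名"
--         elif func.startswith(("extrude_", "revolve_")):
--             category = "3D操作别名"
--         elif func.startswith(("union_", "cut_", "intersect_")):
--             category = "布尔运算别名"
--         elif func.startswith("export_"):
--             category = "导出别名"
--         else:
--             category = "其他别名"
--
--         alias_categories.setdefault(category, []).append((func, alias))
--
--     for category, aliases in alias_categories.items():
--         alias_lines.append(f"# {category}")
--         for func, alias in sorted(aliases, key=lambda item: item[1]):
--             alias_lines.append(f"{alias} = {func}")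
--         alias_lines.append("")
--
--     if alias_lines[-1] == "":
--         alias_lines.pop()
--     return "\n".join(alias_lines)
-- ===== SOURCE B (Python) =====
-- ALIAS_RULES = {
--     "make_point_rvertex": "create_point",
--     "make_line_redge": "create_line",
--     "make_segment_redge": "create_segment",
--     "make_segment_rwire": "create_segment_wire",
--     "make_circle_redge": "create_circle_edge",
--     "make_circle_rwire": "create_circle_wire",
--     "make_circle_rface": "create_circle_face",
--     "make_rectangle_rwire": "create_rectangle_wire",
--     "make_rectangle_rface": "create_rectangle_face",
--     "make_box_rsolid": "create_box",
--     "make_cylinder_rsolid": "create_cylinder",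
--     "make_sphere_rsolid": "create_sphere",
--     "make_angle_arc_redge": "create_angle_arc",
--     "make_angle_arc_rwire": "create_angle_arc_wire",
--     "make_three_point_arc_redge": "create_arc",
--     "make_three_point_arc_rwire": "create_arc_wire",
--     "make_spline_redge": "create_spline",
--     "make_spline_rwire": "create_spline_wire",
--     "make_polyline_rwire": "create_polyline_wire",
--     "make_helix_redge": "create_helix",
--     "make_helix_rwire": "create_helix_wire",
--     "make_face_from_wire_rface": "create_face_from_wire",
--     "make_wire_from_edges_rwire": "create_wire_from_edges",
--     "make_field_surface_rsolid": "create_field_surface",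
--     "translate_shape": "translate",
--     "rotate_shape": "rotate",
--     "extrude_rsolid": "extrude",
--     "revolve_rsolid": "revolve",
--     "union_rsolidlist": "union",
--     "cut_rsolidlist": "cut",
--     "intersect_rsolidlist": "intersect",
--     "export_step": "to_step",
--     "export_stl": "to_stl",
-- }
--
--
-- def _categorize(func):
--     if func.startswith("make_"):
--         return "创建函数别名"
--     if func.startswith(("translate_", "rotate_")):
--         return "变换操作别名"
--     if func.startswith(("extrude_", "revolve_")):
--         return "3D操作别名"
--     if func.startswith(("union_", "cut_", "intersect_")):
--         return "布尔运算别名"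
--     if func.startswith("export_"):
--         return "导出别名"
--     return "其他别名"
--
--
-- def generate_aliases(functions):
--     # one flat pass: (category, (func, alias)) for every known function
--     triples = []
--     for func in functions:
--         alias = ALIAS_RULES.get(func)
--         if alias is not None:
--             triples.append((_categorize(func), (func, alias)))
--
--     # categories in first-appearance order
--     seen = []
--     for cat, _ in triples:
--         if cat not in seen:
--             seen.append(cat)
--
--     lines = ["# 便于使用的别名", "Workplane = SimpleWorkplane"]
--     for cat in seen:
--         lines.append("")
--         lines.append(f"# {cat}")
--         for func, alias in sorted((p for c, p in triples if c == cat), key=lambda p: p[1]):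
--             lines.append(f"{alias} = {func}")
--     return "\n".join(lines)
-- ===== Notes on version B (the rewrite author's own statement) =====
-- stated objective: alternative
-- what changed: B replaces A's dict-of-lists grouping (setdefault/append, then iterating dict items with a trailing blank line trimmed at the end) by one flat pass collecting (category, (func, alias)) triples, a first-appearance category list, and per-category filter+sort emission that places the blank separator BEFORE each category header so no trimming is needed.
import Mathlib
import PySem

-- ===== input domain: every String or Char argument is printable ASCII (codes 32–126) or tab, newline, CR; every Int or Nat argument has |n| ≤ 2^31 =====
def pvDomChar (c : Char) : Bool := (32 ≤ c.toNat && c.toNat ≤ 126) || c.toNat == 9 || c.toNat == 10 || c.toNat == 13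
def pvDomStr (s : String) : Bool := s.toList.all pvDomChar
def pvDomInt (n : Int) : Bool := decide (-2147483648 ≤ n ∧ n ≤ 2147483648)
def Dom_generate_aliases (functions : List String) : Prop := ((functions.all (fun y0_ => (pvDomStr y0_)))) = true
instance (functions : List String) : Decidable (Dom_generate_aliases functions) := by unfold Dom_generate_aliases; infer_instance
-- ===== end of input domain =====

-- B groups by a flat triple pass + first-appearance category list + per-category filter/sort,
-- emitting the blank separator before each header instead of A's dict-of-lists with trailing-line trim.

-- shared module constant ALIAS_RULES
def aliasRules : PySem.Dict String String := PySem.Dict.ofList [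
  ("make_point_rvertex", "create_point"),
  ("make_line_redge", "create_line"),
  ("make_segment_redge", "create_segment"),
  ("make_segment_rwire", "create_segment_wire"),
  ("make_circle_redge", "create_circle_edge"),
  ("make_circle_rwire", "create_circle_wire"),
  ("make_circle_rface", "create_circle_face"),
  ("make_rectangle_rwire", "create_rectangle_wire"),
  ("make_rectangle_rface", "create_rectangle_face"),
  ("make_box_rsolid", "create_box"),
  ("make_cylinder_rsolid", "create_cylinder"),
  ("make_sphere_rsolid", "create_sphere"),
  ("make_angle_arc_redge", "create_angle_arc"),
  ("make_angle_arc_rwire", "create_angle_arc_wire"),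
  ("make_three_point_arc_redge", "create_arc"),
  ("make_three_point_arc_rwire", "create_arc_wire"),
  ("make_spline_redge", "create_spline"),
  ("make_spline_rwire", "create_spline_wire"),
  ("make_polyline_rwire", "create_polyline_wire"),
  ("make_helix_redge", "create_helix"),
  ("make_helix_rwire", "create_helix_wire"),
  ("make_face_from_wire_rface", "create_face_from_wire"),
  ("make_wire_from_edges_rwire", "create_wire_from_edges"),
  ("make_field_surface_rsolid", "create_field_surface"),
  ("translate_shape", "translate"),
  ("rotate_shape", "rotate"),
  ("extrude_rsolid", "extrude"),
  ("revolve_rsolid", "revolve"),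
  ("union_rsolidlist", "union"),
  ("cut_rsolidlist", "cut"),
  ("intersect_rsolidlist", "intersect"),
  ("export_step", "to_step"),
  ("export_stl", "to_stl")]

-- ===== PORT A =====
def generate_aliases (functions : List String) : String :=
  let alias_lines : List String := ["# 便于使用的别名", "Workplane = SimpleWorkplane", ""]
  let alias_categories : PySem.Dict String (List (String × String)) :=
    functions.foldl (fun d func =>
      match aliasRules.get? func with
      | none => d
      | some als =>
        let category : String :=
          if PySem.Str.startswith func "make_" then "创建函数别名"
          else if PySem.Str.startswith func "translate_" || PySem.Str.startswith func "rotate_" then "变换操作别名"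
          else if PySem.Str.startswith func "extrude_" || PySem.Str.startswith func "revolve_" then "3D操作别名"
          else if PySem.Str.startswith func "union_" || PySem.Str.startswith func "cut_" || PySem.Str.startswith func "intersect_" then "布尔运算别名"
          else if PySem.Str.startswith func "export_" then "导出别名"
          else "其他别名"
        d.modify category [] (· ++ [(func, als)])) PySem.Dict.empty
  let alias_lines := alias_categories.items.foldl (fun ls p =>
      (PySem.List.sorted p.2 (fun item => item.2) false).foldl
        (fun ls2 q => ls2 ++ [q.2 ++ " = " ++ q.1]) (ls ++ ["# " ++ p.1]) ++ [""]) alias_lines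
  let alias_lines := if PySem.List.pyGet? alias_lines (-1) == some "" then alias_lines.dropLast else alias_lines
  PySem.Str.join "\n" alias_lines

-- ===== PORT B =====
def categorize (func : String) : String :=
  if PySem.Str.startswith func "make_" then "创建函数别名"
  else if PySem.Str.startswith func "translate_" || PySem.Str.startswith func "rotate_" then "变换操作别名"
  else if PySem.Str.startswith func "extrude_" || PySem.Str.startswith func "revolve_" then "3D操作别名"
  else if PySem.Str.startswith func "union_" || PySem.Str.startswith func "cut_" || PySem.Str.startswith func "intersect_" then "布尔运算别名"
  else if PySem.Str.startswith func "export_" then "导出别名"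
  else "其他别名"

def generate_aliases_alt (functions : List String) : String :=
  let triples : List (String × String × String) :=
    functions.foldl (fun ts func =>
      match aliasRules.get? func with
      | none => ts
      | some als => ts ++ [(categorize func, (func, als))]) []
  let seen : List String :=
    triples.foldl (fun s t => if s.contains t.1 then s else s ++ [t.1]) []
  let lines : List String := ["# 便于使用的别名", "Workplane = SimpleWorkplane"]
  let lines := seen.foldl (fun ls cat =>
      (PySem.List.sorted ((triples.filter (fun t => t.1 == cat)).map (·.2)) (fun p => p.2) false).foldl
        (fun ls2 q => ls2 ++ [q.2 ++ " = " ++ q.1]) (ls ++ ["", "# " ++ cat])) lines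
  PySem.Str.join "\n" lines

-- ===== PRECONDITION & SPEC =====
def Spec_generate_aliases (functions : List String) (out : String) : Prop := out = generate_aliases_alt functions
instance (functions : List String) (out : String) : Decidable (Spec_generate_aliases functions out) := by unfold Spec_generate_aliases; infer_instance

-- ===== CLAIM (what is proved, stated in full; the proofs are below) =====
def Claim_equal_generate_aliases : Prop := ∀ (functions : List String), Dom_generate_aliases functions → Spec_generate_aliases functions (generate_aliases functions)

-- ===== LEMMAS AND PROOFS =====

-- the qualifying triples contributed by one function (generalized over the rules dict R,
-- so that case analysis never touches the 34-entry literal)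
def tripleOfR (R : PySem.Dict String String) (func : String) : List (String × String × String) :=
  match R.get? func with
  | none => []
  | some als => [(categorize func, (func, als))]

theorem triples_eq (R : PySem.Dict String String) (fs : List String)
    (acc : List (String × String × String)) :
    fs.foldl (fun ts func =>
      match R.get? func with
      | none => ts
      | some als => ts ++ [(categorize func, (func, als))]) acc
    = acc ++ fs.flatMap (tripleOfR R) := by
  induction fs generalizing acc with
  | nil => simp
  | cons f fs ih =>
    rw [List.foldl_cons, List.flatMap_cons]
    cases h : R.get? f with
    | none => rw [ih]; simp only [tripleOfR, h, List.nil_append]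
    | some a => rw [ih]; simp only [tripleOfR, h, List.append_assoc, List.cons_append, List.nil_append]

theorem dictA_eq (R : PySem.Dict String String) (fs : List String)
    (d : PySem.Dict String (List (String × String))) :
    fs.foldl (fun d func =>
      match R.get? func with
      | none => d
      | some als =>
        let category : String :=
          if PySem.Str.startswith func "make_" then "创建函数别名"
          else if PySem.Str.startswith func "translate_" || PySem.Str.startswith func "rotate_" then "变换操作别名"
          else if PySem.Str.startswith func "extrude_" || PySem.Str.startswith func "revolve_" then "3D操作别名"
          else if PySem.Str.startswith func "union_" || PySem.Str.startswith func "cut_" || PySem.Str.startswith func "intersect_" then "布尔运算别名"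
          else if PySem.Str.startswith func "export_" then "导出别名"
          else "其他别名"
        d.modify category [] (· ++ [(func, als)])) d
    = (fs.flatMap (tripleOfR R)).foldl (fun d t => d.modify t.1 [] (· ++ [t.2])) d := by
  induction fs generalizing d with
  | nil => simp
  | cons f fs ih =>
    rw [List.foldl_cons, List.flatMap_cons, List.foldl_append]
    cases h : R.get? f with
    | none => rw [ih]; simp only [tripleOfR, h, List.foldl_nil]
    | some a => rw [ih]; simp only [tripleOfR, h, categorize, List.foldl_cons, List.foldl_nil]

-- B's first-appearance category list is a PySem.Set update
theorem seen_eq (l : List (String × String × String)) (s : List String) :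
    l.foldl (fun s t => if s.contains t.1 then s else s ++ [t.1]) s
    = PySem.Set.update s (l.map (·.1)) := by
  rw [PySem.Set.update_map_eq_foldl_add]
  induction l generalizing s with
  | nil => rfl
  | cons t l ih =>
    rw [List.foldl_cons, List.foldl_cons]
    rw [show (if s.contains t.1 then s else s ++ [t.1]) = PySem.Set.add s t.1 from rfl, ih]

-- A's blank line after each block = B's blank line before each block, plus one trailing blank
theorem shift_blank (cats : List String) (E : String → List String) :
    [""] ++ cats.flatMap (fun c => ["# " ++ c] ++ E c ++ [""])
    = cats.flatMap (fun c => ["", "# " ++ c] ++ E c) ++ [""] := by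
  induction cats with
  | nil => simp
  | cons c cs ih =>
    calc ([""] ++ (["# " ++ c] ++ E c ++ [""]) ++ cs.flatMap (fun c => ["# " ++ c] ++ E c ++ [""]))
        = ("" :: ("# " ++ c) :: E c) ++ ([""] ++ cs.flatMap (fun c => ["# " ++ c] ++ E c ++ [""])) := by
          simp
      _ = ("" :: ("# " ++ c) :: E c) ++ (cs.flatMap (fun c => ["", "# " ++ c] ++ E c) ++ [""]) := by
          rw [ih]
      _ = _ := by simp

set_option maxHeartbeats 1000000 in
theorem generate_aliases_spec' (functions : List String) :
    generate_aliases functions = generate_aliases_alt functions := by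
  unfold generate_aliases generate_aliases_alt
  dsimp only
  rw [dictA_eq aliasRules, triples_eq aliasRules, seen_eq]
  simp only [List.nil_append]
  generalize List.flatMap (tripleOfR aliasRules) functions = ts
  have hnd : (List.foldl (fun d t => d.modify t.1 [] fun x => x ++ [t.2]) PySem.Dict.empty ts).keys.Nodup := by
    exact PySem.Dict.nodup_keys_foldl_modify_key ts (fun t => t.1) [] (fun d t => fun x => x ++ [t.2]) PySem.Dict.empty (by simp)
  rw [PySem.Dict.items_eq_map_keys _ hnd []]
  rw [PySem.Dict.keys_foldl_modify_key]
  simp only [PySem.Dict.keys_empty]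
  rw [List.foldl_map]
  simp only [PySem.Dict.getD_foldl_modify_append, PySem.Dict.getD_empty, List.nil_append]
  simp only [PySem.List.foldl_append_singleton_eq_map, List.append_assoc]
  simp only [PySem.List.foldl_append_eq_flatMap]
  have hfst : (fun (x : String × String × String) => x.1) = Prod.fst := rfl
  rw [hfst]
  have main : ∀ (cats : List String) (E : String → List String),
      (if (PySem.List.pyGet? (["# 便于使用的别名", "Workplane = SimpleWorkplane", ""] ++
            cats.flatMap (fun x => ["# " ++ x] ++ (E x ++ [""]))) (-1) == some "") = true then
        (["# 便于使用的别名", "Workplane = SimpleWorkplane", ""] ++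
            cats.flatMap (fun x => ["# " ++ x] ++ (E x ++ [""]))).dropLast
      else
        ["# 便于使用的别名", "Workplane = SimpleWorkplane", ""] ++
            cats.flatMap (fun x => ["# " ++ x] ++ (E x ++ [""])))
      = ["# 便于使用的别名", "Workplane = SimpleWorkplane"] ++ cats.flatMap (fun x => ["", "# " ++ x] ++ E x) := by
    intro cats E
    have h1 : ["# 便于使用的别名", "Workplane = SimpleWorkplane", ""] ++
          cats.flatMap (fun x => ["# " ++ x] ++ (E x ++ [""]))
        = (["# 便于使用的别名", "Workplane = SimpleWorkplane"] ++
            cats.flatMap (fun x => ["", "# " ++ x] ++ E x)) ++ [""] := by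
      calc ["# 便于使用的别名", "Workplane = SimpleWorkplane", ""] ++
            cats.flatMap (fun x => ["# " ++ x] ++ (E x ++ [""]))
          = ["# 便于使用的别名", "Workplane = SimpleWorkplane"] ++
            ([""] ++ cats.flatMap (fun c => ["# " ++ c] ++ E c ++ [""])) := by simp
        _ = ["# 便于使用的别名", "Workplane = SimpleWorkplane"] ++
            (cats.flatMap (fun c => ["", "# " ++ c] ++ E c) ++ [""]) := by rw [shift_blank]
        _ = _ := by simp
    rw [h1, PySem.List.pyGet?_neg_one_append_singleton]
    rw [if_pos (by simp)]
    rw [List.dropLast_concat]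
  rw [main]

-- ===== VERDICT (by name: the statement is the Claim_ definition above) =====
theorem generate_aliases_spec : Claim_equal_generate_aliases := by
  intro functions _
  exact generate_aliases_spec' functions
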